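-- pv_equiv track=rewrite | github.com/s3fagawaakaderkingvomhinterhof/Aufgabe4-Terminagent | Calendar.py | pack_meetings
-- ===== SOURCE A (Python) =====
-- def pack_meetings(dates):
--     size = len(dates)
--     res = []
--     for i in range(size):
--         temp = dates[i]
--         if len(res) == 0:
--             res.append(temp)
--         else:
--             if temp[0] == res[len(res) - 1][0]:
--                 res[len(res) - 1][1] += 1  # count up timeslots for one day
--             else:
--                 res.append(temp)  # add new timeslot for other day
--     return res
-- ===== SOURCE B (Python) =====
-- def pack_meetings(dates):
--     out = []
--     rest = dates
--     while rest:
--         first = rest[0]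
--         c = 0
--         for item in rest[1:]:
--             if item[0] != first[0]:
--                 break
--             c += 1
--         if c:
--             first[1] += c  # add whole run's extra slots at once
--         out.append(first)
--         rest = rest[1 + c:]
--     return out
-- ===== Notes on version B (the rewrite author's own statement) =====
-- stated objective: alternative
-- what changed: B splits the list into maximal runs of equal first elements and bumps each run head's slot count once by the whole run length, instead of A's element-by-element peek at the last accumulated entry with +1 increments.
import Mathlib
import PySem

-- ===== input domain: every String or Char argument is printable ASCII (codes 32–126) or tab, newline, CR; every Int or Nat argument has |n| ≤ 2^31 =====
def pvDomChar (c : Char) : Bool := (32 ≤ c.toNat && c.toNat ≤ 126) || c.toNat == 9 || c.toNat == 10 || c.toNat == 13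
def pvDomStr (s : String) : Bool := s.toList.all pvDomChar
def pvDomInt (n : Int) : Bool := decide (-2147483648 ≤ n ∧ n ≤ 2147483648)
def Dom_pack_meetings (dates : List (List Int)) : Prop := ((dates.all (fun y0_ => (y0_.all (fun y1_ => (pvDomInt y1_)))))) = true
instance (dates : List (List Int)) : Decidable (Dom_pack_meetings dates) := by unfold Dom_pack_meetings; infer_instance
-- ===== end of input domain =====

-- B collapses each maximal run of equal-headed entries in one step, adding the whole
-- run length to the run head's slot count at once, instead of A's element-wise peek at
-- the last accumulated entry with repeated +1 increments. Both mutate the input's inner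
-- lists in place in Python identically; the theorems are about the return value.

-- ===== PORT A =====
-- one loop step of A: peek at the last element of res, bump its slot count or append
def pmStep (res : List (List Int)) (temp : List Int) : List (List Int) :=
  if res.length = 0 then res ++ [temp]
  else if temp.headI = (res.getD (res.length - 1) []).headI then
    res.set (res.length - 1)
      ((res.getD (res.length - 1) []).set 1 ((res.getD (res.length - 1) []).getD 1 0 + 1))
  else res ++ [temp]

def pack_meetings (dates : List (List Int)) : List (List Int) :=
  dates.foldl pmStep []

-- ===== PORT B =====
-- length of the maximal leading run of elements whose head equals h (B's inner for-loop)
def pmCountRun (h : Int) : List (List Int) → Nat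
  | [] => 0
  | x :: xs => if x.headI = h then pmCountRun h xs + 1 else 0

-- B's outer while-loop: emit the (bumped) run head, continue after the run
def pmPack : List (List Int) → List (List Int)
  | [] => []
  | first :: rest =>
    let c := pmCountRun first.headI rest
    (if 0 < c then first.set 1 (first.getD 1 0 + (c : Int)) else first) :: pmPack (rest.drop c)
termination_by l => l.length
decreasing_by simp only [List.length_drop, List.length_cons]; omega

def pack_meetings_alt (dates : List (List Int)) : List (List Int) :=
  pmPack dates

-- ===== PRECONDITION & SPEC =====
-- Pre_: exactly the inputs on which Python A returns normally: with at least two entries,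
-- every entry must be non-empty (temp[0]/res[-1][0] would raise IndexError) and every run
-- head whose run extends must have length ≥ 2 (res[-1][1] += 1 would raise IndexError).
def Pre_pack_meetings (dates : List (List Int)) : Prop :=
  dates.length ≤ 1 ∨
  ((∀ l ∈ dates, l ≠ []) ∧
   ∀ i < dates.length - 1,
     (dates.getD (i+1) []).headI = (dates.getD i []).headI →
     (i = 0 ∨ (dates.getD (i-1) []).headI ≠ (dates.getD i []).headI) →
     2 ≤ (dates.getD i []).length)
instance (dates : List (List Int)) : Decidable (Pre_pack_meetings dates) := by
  unfold Pre_pack_meetings; infer_instance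

def pvWitness_pack_meetings : List (List Int) := [[1, 1], [1, 1], [2, 1]]

def Spec_pack_meetings (dates : List (List Int)) (out : List (List Int)) : Prop := out = pack_meetings_alt dates
instance (dates : List (List Int)) (out : List (List Int)) : Decidable (Spec_pack_meetings dates out) := by unfold Spec_pack_meetings; infer_instance

-- ===== CLAIM (what is proved, stated in full; the proofs are below) =====
def Claim_equal_pack_meetings : Prop := ∀ (dates : List (List Int)), Dom_pack_meetings dates → Pre_pack_meetings dates → Spec_pack_meetings dates (pack_meetings dates)

-- ===== LEMMAS AND PROOFS =====

-- A's single +1 bump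
def pmBump (l : List Int) : List Int := l.set 1 (l.getD 1 0 + 1)

-- B's bulk bump of the run head
def pmBumpBy (l : List Int) (c : Nat) : List Int :=
  if 0 < c then l.set 1 (l.getD 1 0 + (c : Int)) else l

theorem pmBump_headI (l : List Int) : (pmBump l).headI = l.headI := by
  cases l with
  | nil => rfl
  | cons a t => cases t <;> rfl

theorem pmBump_bumpBy (l : List Int) (c : Nat) :
    pmBumpBy (pmBump l) c = pmBumpBy l (c + 1) := by
  cases l with
  | nil => simp [pmBump, pmBumpBy]
  | cons a t =>
    cases t with
    | nil => simp [pmBump, pmBumpBy]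
    | cons b t' =>
      cases c with
      | zero => simp [pmBump, pmBumpBy]
      | succ c =>
        simp [pmBump, pmBumpBy]
        ring

theorem pmPack_nil : pmPack [] = [] := by rw [pmPack]

theorem pmPack_cons (first : List Int) (rest : List (List Int)) :
    pmPack (first :: rest) =
      (if 0 < pmCountRun first.headI rest then
        first.set 1 (first.getD 1 0 + (pmCountRun first.headI rest : Int)) else first)
        :: pmPack (rest.drop (pmCountRun first.headI rest)) := by
  rw [pmPack]

-- A's step on a non-empty accumulator only looks at / rewrites its last element
theorem pmStep_append (acc : List (List Int)) (c x : List Int) :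
    pmStep (acc ++ [c]) x =
      if x.headI = c.headI then acc ++ [pmBump c] else (acc ++ [c]) ++ [x] := by
  have hlen : (acc ++ [c]).length - 1 = acc.length := by simp
  have hget : (acc ++ [c]).getD acc.length [] = c := by
    simp [List.getD]
  have hset : (acc ++ [c]).set acc.length (pmBump c) = acc ++ [pmBump c] := by
    rw [List.set_append_right _ _ (Nat.le_refl _)]
    simp
  simp only [pmStep, hlen, hget]
  have : (acc ++ [c]).length = 0 ↔ False := by simp
  rw [if_neg (by simp)]
  split_ifs with h
  · exact hset
  · rfl

-- A's fold never touches the part of the accumulator before the last element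
theorem pm_foldl_frame (l : List (List Int)) :
    ∀ (acc : List (List Int)) (c : List Int),
      List.foldl pmStep (acc ++ [c]) l = acc ++ List.foldl pmStep [c] l := by
  induction l with
  | nil => intro acc c; rfl
  | cons x xs ih =>
    intro acc c
    simp only [List.foldl_cons]
    rw [pmStep_append]
    have h0 : pmStep [c] x = if x.headI = c.headI then [pmBump c] else [c] ++ [x] := by
      have := pmStep_append [] c x
      simpa using this
    rw [h0]
    split_ifs with h
    · exact ih acc (pmBump c)
    · rw [ih (acc ++ [c]) x, ih [c] x]
      simp
-- A's fold started on a singleton accumulator produces B's run decomposition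
theorem pm_foldl_run (l : List (List Int)) :
    ∀ (c : List Int),
      List.foldl pmStep [c] l =
        pmBumpBy c (pmCountRun c.headI l) :: pmPack (l.drop (pmCountRun c.headI l)) := by
  induction l with
  | nil => intro c; simp [pmCountRun, pmBumpBy, pmPack_nil]
  | cons x xs ih =>
    intro c
    simp only [List.foldl_cons]
    have h0 : pmStep [c] x = if x.headI = c.headI then [pmBump c] else [c] ++ [x] := by
      have := pmStep_append [] c x
      simpa using this
    rw [h0]
    split_ifs with h
    · rw [ih (pmBump c)]
      rw [pmBump_headI]
      have hcr : pmCountRun c.headI (x :: xs) = pmCountRun c.headI xs + 1 := by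
        simp [pmCountRun, h]
      rw [hcr, pmBump_bumpBy]
      simp
    · rw [pm_foldl_frame xs [c] x, ih x]
      have hcr : pmCountRun c.headI (x :: xs) = 0 := by
        simp [pmCountRun, h]
      rw [hcr]
      simp only [List.drop_zero, pmPack_cons]
      simp [pmBumpBy]

-- the two ports agree on every input
theorem pm_eq (dates : List (List Int)) : pack_meetings dates = pack_meetings_alt dates := by
  cases dates with
  | nil =>
    show List.foldl pmStep [] [] = pmPack []
    rw [pmPack_nil]; rfl
  | cons c xs =>
    show List.foldl pmStep (pmStep [] c) xs = pmPack (c :: xs)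
    have h1 : pmStep [] c = [c] := by simp [pmStep]
    rw [h1, pm_foldl_run xs c, pmPack_cons]
    simp [pmBumpBy, List.getD]

-- ===== VERDICT (by name: the statement is the Claim_ definition above) =====
theorem pack_meetings_spec : Claim_equal_pack_meetings := by
  intro dates _ _
  unfold Spec_pack_meetings
  exact pm_eq dates
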